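-- pv_equiv track=rewrite | github.com/ChuloIva/JB_mech | scripts/analyze_vuln_database.py | generate_cluster_summaries
-- ===== SOURCE A (Python) =====
-- from collections import Counter
--
-- def generate_cluster_summaries(
--     vulnerabilities: list,
--     labels: list,
-- ) -> dict:
--     """Generate human-readable cluster summaries using most common tags."""
--     cluster_summaries = {}
--     clusters = sorted(set(labels) - {-1})
--
--     for cluster in clusters:
--         cluster_vulns = [v for v, l in zip(vulnerabilities, labels) if l == cluster]
--
--         # Get most common tags
--         tag_counts = Counter()
--         for v in cluster_vulns:
--             tag_counts.update(v.get("tags", []))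
--
--         top_tags = [t for t, _ in tag_counts.most_common(3)]
--         cluster_summaries[cluster] = f"{'+'.join(top_tags)} ({len(cluster_vulns)})"
--
--     return cluster_summaries
-- ===== SOURCE B (Python) =====
-- from collections import Counter
--
--
-- def generate_cluster_summaries(
--     vulnerabilities: list,
--     labels: list,
-- ) -> dict:
--     """Single pass: group tag counts and sizes per cluster, then format."""
--     counts = {}
--     sizes = Counter()
--     for v, l in zip(vulnerabilities, labels):
--         if l != -1:
--             sizes[l] += 1
--             counts.setdefault(l, Counter()).update(v.get("tags", []))
--     return {
--         c: "{} ({})".format(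
--             "+".join(t for t, _ in counts.get(c, Counter()).most_common(3)),
--             sizes[c],
--         )
--         for c in sorted(set(labels) - {-1})
--     }
-- ===== Notes on version B (the rewrite author's own statement) =====
-- stated objective: faster
-- what changed: Replaces the per-cluster rescans of zip(vulnerabilities, labels) with one single pass that groups tag Counters and sizes by label, then formats each sorted cluster from the precomputed tables.
import Mathlib
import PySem

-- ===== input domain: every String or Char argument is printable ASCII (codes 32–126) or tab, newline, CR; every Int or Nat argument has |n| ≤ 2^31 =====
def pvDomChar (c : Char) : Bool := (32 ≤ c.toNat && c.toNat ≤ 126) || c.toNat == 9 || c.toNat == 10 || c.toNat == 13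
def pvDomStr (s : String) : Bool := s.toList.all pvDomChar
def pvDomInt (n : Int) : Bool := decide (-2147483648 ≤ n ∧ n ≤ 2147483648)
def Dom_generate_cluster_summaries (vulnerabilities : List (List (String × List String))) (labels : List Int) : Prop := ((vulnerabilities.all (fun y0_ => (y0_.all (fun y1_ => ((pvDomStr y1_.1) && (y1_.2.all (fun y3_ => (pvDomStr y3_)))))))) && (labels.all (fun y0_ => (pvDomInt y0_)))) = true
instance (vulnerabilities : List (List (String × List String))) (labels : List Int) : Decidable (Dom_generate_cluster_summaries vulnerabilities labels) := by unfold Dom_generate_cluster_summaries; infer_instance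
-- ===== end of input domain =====

-- B replaces A's per-cluster rescans of zip(vulnerabilities, labels) with one single pass
-- grouping tag counts and cluster sizes by label (objective: faster, asymptotically).

-- shared transliterations of Python idioms both sources use verbatim:
-- v.get("tags", []) on the association list (first match, per the type convention)
def pvTags (v : List (String × List String)) : List String :=
  (List.lookup "tags" v).getD []
-- 'tag_counts.update(ts)' (Counter.update: count elements, new keys appended in order)
def pvUpdateTags (cnt : PySem.Dict String Int) (v : List (String × List String)) : PySem.Dict String Int :=
  (pvTags v).foldl (fun d t => d.modify t 0 (· + 1)) cnt
-- '[t for t, _ in cnt.most_common(3)]' (most_common(n) = sorted(items, key=count, reverse=True)[:n], stable)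
def pvTop3 (cnt : PySem.Dict String Int) : List String :=
  ((PySem.List.sorted cnt.items (fun p => p.2) true).take 3).map (·.1)
-- f"{'+'.join(top_tags)} ({n})"
def pvFmt (top_tags : List String) (n : Int) : String :=
  PySem.Str.join "" [PySem.Str.join "+" top_tags, " (", PySem.Int.toStr n, ")"]

-- ===== PORT A =====
def generate_cluster_summaries (vulnerabilities : List (List (String × List String))) (labels : List Int) : List (Int × String) :=
  let clusters := PySem.List.sorted (PySem.Set.diff (PySem.Set.ofList labels) [-1]) (fun x => x) false
  (clusters.foldl (fun summ cluster =>
      let cluster_vulns := ((vulnerabilities.zip labels).filter (fun p => p.2 == cluster)).map (·.1)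
      let tag_counts := cluster_vulns.foldl pvUpdateTags PySem.Dict.empty
      summ.insert cluster (pvFmt (pvTop3 tag_counts) (cluster_vulns.length : Int)))
    PySem.Dict.empty).items

-- ===== PORT B =====
def generate_cluster_summaries_alt (vulnerabilities : List (List (String × List String))) (labels : List Int) : List (Int × String) :=
  -- one pass: counts[l].update(tags); sizes[l] += 1  (setdefault+update ported as Dict.modify)
  let st := (vulnerabilities.zip labels).foldl
      (fun (st : PySem.Dict Int (PySem.Dict String Int) × PySem.Dict Int Int) p =>
        if p.2 ≠ -1 then
          (st.1.modify p.2 PySem.Dict.empty (fun cnt => pvUpdateTags cnt p.1),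
           st.2.modify p.2 0 (· + 1))
        else st)
      (PySem.Dict.empty, PySem.Dict.empty)
  ((PySem.List.sorted (PySem.Set.diff (PySem.Set.ofList labels) [-1]) (fun x => x) false).foldl
      (fun summ c =>
        summ.insert c (pvFmt (pvTop3 (st.1.getD c PySem.Dict.empty)) (st.2.getD c 0)))
    PySem.Dict.empty).items

-- ===== PRECONDITION & SPEC =====
def Spec_generate_cluster_summaries (vulnerabilities : List (List (String × List String))) (labels : List Int) (out : List (Int × String)) : Prop := out = generate_cluster_summaries_alt vulnerabilities labels
instance (vulnerabilities : List (List (String × List String))) (labels : List Int) (out : List (Int × String)) : Decidable (Spec_generate_cluster_summaries vulnerabilities labels out) := by unfold Spec_generate_cluster_summaries; infer_instance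

-- ===== CLAIM (what is proved, stated in full; the proofs are below) =====
def Claim_equal_generate_cluster_summaries : Prop := ∀ (vulnerabilities : List (List (String × List String))) (labels : List Int), Dom_generate_cluster_summaries vulnerabilities labels → Spec_generate_cluster_summaries vulnerabilities labels (generate_cluster_summaries vulnerabilities labels)

-- ===== LEMMAS AND PROOFS =====

theorem pv_counts_getD (ps : List ((List (String × List String)) × Int))
    (d : PySem.Dict Int (PySem.Dict String Int)) (c : Int) :
    (ps.foldl (fun d p => d.modify p.2 PySem.Dict.empty (fun cnt => pvUpdateTags cnt p.1)) d).getD c PySem.Dict.empty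
      = (ps.filter (fun p => p.2 == c)).foldl (fun acc p => pvUpdateTags acc p.1) (d.getD c PySem.Dict.empty) := by
  induction ps generalizing d with
  | nil => rfl
  | cons p t ih =>
    simp only [List.foldl_cons, List.filter_cons]
    by_cases h : p.2 = c
    · subst h
      simp [ih, PySem.Dict.getD_modify_self]
    · rw [ih, PySem.Dict.getD_modify_of_ne d PySem.Dict.empty _ (Ne.symm h)]
      simp [h]

theorem pv_sizes_getD (ps : List ((List (String × List String)) × Int))
    (s : PySem.Dict Int Int) (c : Int) :
    (ps.foldl (fun s p => s.modify p.2 0 (· + 1)) s).getD c 0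
      = s.getD c 0 + (ps.countP (fun p => p.2 == c) : Int) := by
  induction ps generalizing s with
  | nil => simp
  | cons p t ih =>
    simp only [List.foldl_cons, List.countP_cons]
    by_cases h : p.2 = c
    · subst h
      rw [ih]
      rw [PySem.Dict.getD_modify_self]
      simp
      omega
    · rw [ih, PySem.Dict.getD_modify_of_ne s 0 _ (Ne.symm h)]
      simp [h]

theorem pv_filter_ne_filter_eq (ps : List ((List (String × List String)) × Int)) (c : Int) (hc : c ≠ -1) :
    (ps.filter (fun p => decide (p.2 ≠ -1))).filter (fun p => p.2 == c)
      = ps.filter (fun p => p.2 == c) := by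
  rw [List.filter_filter]
  apply List.filter_congr
  intro p _
  by_cases h : p.2 = c
  · simp [h, hc]
  · simp [h]

theorem pv_split (ps : List ((List (String × List String)) × Int))
    (d : PySem.Dict Int (PySem.Dict String Int)) (s : PySem.Dict Int Int) :
    ps.foldl (fun st p => (st.1.modify p.2 PySem.Dict.empty (fun cnt => pvUpdateTags cnt p.1),
        st.2.modify p.2 0 (· + 1))) (d, s)
      = (ps.foldl (fun d p => d.modify p.2 PySem.Dict.empty (fun cnt => pvUpdateTags cnt p.1)) d,
         ps.foldl (fun s p => s.modify p.2 0 (· + 1)) s) := by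
  induction ps generalizing d s with
  | nil => rfl
  | cons p t ih => simp [ih]

set_option maxHeartbeats 1000000 in
theorem pv_main (vulns : List (List (String × List String))) (labels : List Int) :
    generate_cluster_summaries vulns labels = generate_cluster_summaries_alt vulns labels := by
  unfold generate_cluster_summaries generate_cluster_summaries_alt
  apply congrArg PySem.Dict.items
  apply PySem.List.foldl_congr_mem
  intro acc c hc
  have hc' : c ≠ -1 := by
    have hm := (PySem.List.mem_sorted (xs := PySem.Set.diff (PySem.Set.ofList labels) [-1])
      (key := fun x => x) (rev := false) (x := c)).mp hc
    simp [PySem.Set.diff] at hm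
    exact hm.2
  rw [PySem.List.foldl_ite_eq_foldl_filter (p := fun (p : (List (String × List String)) × Int) => p.2 ≠ (-1:Int))]
  rw [pv_split]
  rw [pv_counts_getD, pv_filter_ne_filter_eq _ _ hc', pv_sizes_getD]
  have hcp : List.countP (fun (a : (List (String × List String)) × Int) => a.2 == c && !decide (a.2 = -1)) (vulns.zip labels)
      = (List.filter (fun (p : (List (String × List String)) × Int) => p.2 == c) (vulns.zip labels)).length := by
    rw [List.countP_congr (q := fun (a : (List (String × List String)) × Int) => a.2 == c)]
    · exact List.countP_eq_length_filter
    · intro a _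
      by_cases h : a.2 = c
      · simp [h, hc']
      · simp [h]
  simp [PySem.Dict.getD_empty, List.foldl_map, List.countP_filter, hcp]

-- ===== VERDICT (by name: the statement is the Claim_ definition above) =====
theorem generate_cluster_summaries_spec : Claim_equal_generate_cluster_summaries := by
  intro vulns labels _
  unfold Spec_generate_cluster_summaries
  exact pv_main vulns labels
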